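-- pv_equiv track=rewrite | github.com/ashreim-UPL/scenarioops_public | src/scenarioops/graph/nodes/force_builder.py | _plan_chunks
-- ===== SOURCE A (Python) =====
-- from typing import Any, Iterable, Mapping
--
-- _PESTEL_DOMAINS = (
--     "political",
--     "economic",
--     "social",
--     "technological",
--     "environmental",
--     "legal",
-- )
--
-- def _plan_chunks(
--     domain_targets: Mapping[str, int],
--     chunk_size: int,
-- ) -> list[dict[str, int]]:
--     remaining = {
--         domain: int(domain_targets.get(domain, 0)) for domain in _PESTEL_DOMAINS
--     }
--     chunks: list[dict[str, int]] = []
--     total_remaining = sum(remaining.values())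
--     if total_remaining <= 0:
--         return chunks
--     domains = list(_PESTEL_DOMAINS)
--     while total_remaining > 0:
--         chunk: dict[str, int] = {domain: 0 for domain in domains}
--         capacity = min(chunk_size, total_remaining)
--         idx = 0
--         while capacity > 0:
--             domain = domains[idx % len(domains)]
--             if remaining[domain] > 0:
--                 chunk[domain] += 1
--                 remaining[domain] -= 1
--                 capacity -= 1
--                 total_remaining -= 1
--             idx += 1
--         chunks.append({domain: count for domain, count in chunk.items() if count > 0})
--     return chunks
-- ===== SOURCE B (Python) =====
-- _PESTEL_DOMAINS = (
--     "political",
--     "economic",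
--     "social",
--     "technological",
--     "environmental",
--     "legal",
-- )
--
-- def _plan_chunks(domain_targets, chunk_size):
--     remaining = {d: int(domain_targets.get(d, 0)) for d in _PESTEL_DOMAINS}
--     total = sum(remaining.values())
--     chunks = []
--     while total > 0:
--         capacity = min(chunk_size, total)
--         total -= capacity
--         chunk = {}
--         while capacity > 0:
--             active = [d for d in _PESTEL_DOMAINS if remaining[d] > 0]
--             k = len(active)
--             rounds = min(capacity // k, min(remaining[d] for d in active))
--             if rounds > 0:
--                 for d in active:
--                     chunk[d] = chunk.get(d, 0) + rounds
--                     remaining[d] -= rounds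
--                 capacity -= rounds * k
--             else:
--                 for d in active[:capacity]:
--                     chunk[d] = chunk.get(d, 0) + 1
--                     remaining[d] -= 1
--                 capacity = 0
--         chunks.append(chunk)
--     return chunks
-- ===== Notes on version B (the rewrite author's own statement) =====
-- stated objective: alternative
-- what changed: Replaces A's per-unit round-robin inner loop (one index step and one decrement per allocated item) by an arithmetic per-phase allocation: each phase gives min(capacity // k, min remaining) full rounds to all k active domains at once via division and min, so each chunk is planned in O(1) phases instead of O(chunk_size) unit steps.
import Mathlib
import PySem

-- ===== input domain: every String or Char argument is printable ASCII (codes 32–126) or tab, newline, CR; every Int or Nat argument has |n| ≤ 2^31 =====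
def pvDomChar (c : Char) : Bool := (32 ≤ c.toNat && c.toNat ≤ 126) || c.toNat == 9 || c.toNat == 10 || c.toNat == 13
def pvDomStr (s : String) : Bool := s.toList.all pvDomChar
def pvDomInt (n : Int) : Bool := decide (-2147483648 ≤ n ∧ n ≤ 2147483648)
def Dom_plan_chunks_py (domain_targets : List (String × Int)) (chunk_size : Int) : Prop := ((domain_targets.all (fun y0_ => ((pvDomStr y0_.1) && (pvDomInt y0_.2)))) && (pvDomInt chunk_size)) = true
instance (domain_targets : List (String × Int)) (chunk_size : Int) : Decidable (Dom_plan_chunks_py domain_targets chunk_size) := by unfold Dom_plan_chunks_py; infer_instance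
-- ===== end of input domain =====

-- B replaces A's per-unit round-robin inner loop by an arithmetic per-phase allocation
-- (division/min over the active domains); objective: alternative algorithm, same result.

-- the fixed PESTEL domain list (module constant _PESTEL_DOMAINS)
def pvPestel : List String :=
  ["political", "economic", "social", "technological", "environmental", "legal"]

-- ===== PORT A =====
-- inner `while capacity > 0` loop of A; state (chunk, remaining, capacity, total_remaining), idx.
-- Fuel makes the loop total; the caller passes enough fuel for every input Pre_ admits.
-- `domains[idx % len(domains)]` : pyGet? with idx % 6 is always in range (`.getD ""` never fires);
-- `remaining[domain]` / `chunk[domain]` : domain is always a key, ported as getD/insert.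
def pvA_inner : Nat → Int → PySem.Dict String Int → PySem.Dict String Int → Int → Int →
    PySem.Dict String Int × PySem.Dict String Int × Int
  | 0, _, chunk, remaining, _, total => (chunk, remaining, total)
  | fuel + 1, idx, chunk, remaining, capacity, total =>
    if 0 < capacity then
      let domain := (PySem.List.pyGet? pvPestel (PySem.Int.mod idx 6)).getD ""
      if 0 < remaining.getD domain 0 then
        pvA_inner fuel (idx + 1) (chunk.insert domain (chunk.getD domain 0 + 1))
          (remaining.insert domain (remaining.getD domain 0 - 1)) (capacity - 1) (total - 1)
      else
        pvA_inner fuel (idx + 1) chunk remaining capacity total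
    else (chunk, remaining, total)

-- outer `while total_remaining > 0` loop of A (fuel-counted; total decreases by ≥ 1 per pass on Pre_)
def pvA_outer : Nat → PySem.Dict String Int → Int → Int → List (List (String × Int)) →
    List (List (String × Int))
  | 0, _, _, _, chunks => chunks
  | fuel + 1, remaining, chunk_size, total, chunks =>
    if 0 < total then
      let chunk0 := pvPestel.foldl (fun d dom => d.insert dom 0) PySem.Dict.empty
      let capacity := min chunk_size total
      let st := pvA_inner (capacity.toNat * 6 + 6) 0 chunk0 remaining capacity total
      pvA_outer fuel st.2.1 chunk_size st.2.2
        (chunks ++ [st.1.items.filter (fun p => decide (0 < p.2))])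
    else chunks

def plan_chunks_py (domain_targets : List (String × Int)) (chunk_size : Int) :
    List (List (String × Int)) :=
  let remaining := pvPestel.foldl
    (fun d dom => d.insert dom ((PySem.Dict.mk domain_targets).getD dom 0)) PySem.Dict.empty
  let total := remaining.values.sum
  if total ≤ 0 then [] else pvA_outer (total.toNat + 1) remaining chunk_size total []

-- ===== PORT B =====
-- inner `while capacity > 0` loop of B: one arithmetic phase per iteration
-- (`min(...)` over empty active / `// 0` cannot happen on Pre_; fuel 20 ≥ #phases + 2).
def pvB_inner : Nat → PySem.Dict String Int → PySem.Dict String Int → Int →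
    PySem.Dict String Int × PySem.Dict String Int
  | 0, chunk, remaining, _ => (chunk, remaining)
  | fuel + 1, chunk, remaining, capacity =>
    if 0 < capacity then
      let active := pvPestel.filter (fun d => decide (0 < remaining.getD d 0))
      let k : Int := (active.length : Int)
      let rounds := min (PySem.Int.floordiv capacity k)
        ((PySem.List.min? (active.map (fun d => remaining.getD d 0)) (fun x => x)).getD 0)
      if 0 < rounds then
        let st := active.foldl
          (fun (s : PySem.Dict String Int × PySem.Dict String Int) d =>
            (s.1.insert d (s.1.getD d 0 + rounds), s.2.insert d (s.2.getD d 0 - rounds)))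
          (chunk, remaining)
        pvB_inner fuel st.1 st.2 (capacity - rounds * k)
      else
        let st := (PySem.List.slice active none (some capacity)).foldl
          (fun (s : PySem.Dict String Int × PySem.Dict String Int) d =>
            (s.1.insert d (s.1.getD d 0 + 1), s.2.insert d (s.2.getD d 0 - 1)))
          (chunk, remaining)
        pvB_inner fuel st.1 st.2 0
    else (chunk, remaining)

def pvB_outer : Nat → PySem.Dict String Int → Int → Int → List (List (String × Int)) →
    List (List (String × Int))
  | 0, _, _, _, chunks => chunks
  | fuel + 1, remaining, chunk_size, total, chunks =>
    if 0 < total then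
      let capacity := min chunk_size total
      let st := pvB_inner 20 PySem.Dict.empty remaining capacity
      pvB_outer fuel st.2 chunk_size (total - capacity) (chunks ++ [st.1.items])
    else chunks

def plan_chunks_py_alt (domain_targets : List (String × Int)) (chunk_size : Int) :
    List (List (String × Int)) :=
  let remaining := pvPestel.foldl
    (fun d dom => d.insert dom ((PySem.Dict.mk domain_targets).getD dom 0)) PySem.Dict.empty
  let total := remaining.values.sum
  if total ≤ 0 then [] else pvB_outer (total.toNat + 1) remaining chunk_size total []

-- ===== PRECONDITION & SPEC =====
-- Pre_ excludes exactly the inputs where A (and B) DIVERGES: chunk_size ≤ 0 while the summed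
-- PESTEL targets are positive (the while loop then makes no progress). A never returns there.
def Pre_plan_chunks_py (domain_targets : List (String × Int)) (chunk_size : Int) : Prop :=
  (pvPestel.map (fun d => (PySem.Dict.mk domain_targets).getD d 0)).sum ≤ 0 ∨ 1 ≤ chunk_size
instance (domain_targets : List (String × Int)) (chunk_size : Int) :
    Decidable (Pre_plan_chunks_py domain_targets chunk_size) := by
  unfold Pre_plan_chunks_py; infer_instance

def pvWitness_plan_chunks_py : (List (String × Int)) × Int :=
  ([("political", 3), ("economic", 2)], 2)

def Spec_plan_chunks_py (domain_targets : List (String × Int)) (chunk_size : Int)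
    (out : List (List (String × Int))) : Prop :=
  out = plan_chunks_py_alt domain_targets chunk_size
instance (domain_targets : List (String × Int)) (chunk_size : Int)
    (out : List (List (String × Int))) :
    Decidable (Spec_plan_chunks_py domain_targets chunk_size out) := by
  unfold Spec_plan_chunks_py; infer_instance

-- ===== CLAIM (what is proved, stated in full; the proofs are below) =====
def Claim_equal_plan_chunks_py : Prop := ∀ (domain_targets : List (String × Int)) (chunk_size : Int), Dom_plan_chunks_py domain_targets chunk_size → Pre_plan_chunks_py domain_targets chunk_size → Spec_plan_chunks_py domain_targets chunk_size (plan_chunks_py domain_targets chunk_size)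

-- ===== LEMMAS AND PROOFS =====

-- proof-side abbreviations
def pvUpd (t : PySem.Dict String Int) (S : List String) (δ : Int) : PySem.Dict String Int :=
  S.foldl (fun t d => t.insert d (t.getD d 0 + δ)) t

def pvAct (r : PySem.Dict String Int) : List String :=
  pvPestel.filter (fun d => decide (0 < r.getD d 0))

def pvPos (r : PySem.Dict String Int) : Int :=
  (pvPestel.map (fun d => max (r.getD d 0) 0)).sum

def pvStep (st : PySem.Dict String Int × PySem.Dict String Int × Int × Int) (d : String) :
    PySem.Dict String Int × PySem.Dict String Int × Int × Int :=
  if 0 < st.2.2.1 ∧ 0 < st.2.1.getD d 0 then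
    (st.1.insert d (st.1.getD d 0 + 1), st.2.1.insert d (st.2.1.getD d 0 - 1),
      st.2.2.1 - 1, st.2.2.2 - 1)
  else st

-- weak chunk invariant relating A's chunk dict a and B's chunk dict b
def pvInv (a b : PySem.Dict String Int) : Prop :=
  a.keys = pvPestel ∧ (∀ d, b.getD d 0 = a.getD d 0) ∧ (∀ d, 0 ≤ a.getD d 0) ∧
  b.items = (pvPestel.filter (fun d => decide (0 < a.getD d 0))).map (fun d => (d, a.getD d 0))

theorem pvA_done (f : Nat) (idx : Int) (ch r : PySem.Dict String Int) (cap tot : Int)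
    (h : ¬ 0 < cap) : pvA_inner f idx ch r cap tot = (ch, r, tot) := by
  cases f <;> simp [pvA_inner, h]

theorem pvB_done (f : Nat) (ch r : PySem.Dict String Int) (cap : Int)
    (h : ¬ 0 < cap) : pvB_inner f ch r cap = (ch, r) := by
  cases f <;> simp [pvB_inner, h]

theorem pvA_shift (f : Nat) (idx : Int) (ch r : PySem.Dict String Int) (cap tot : Int) :
    pvA_inner f (idx + 6) ch r cap tot = pvA_inner f idx ch r cap tot := by
  induction f generalizing idx ch r cap tot with
  | zero => rfl
  | succ f ih =>
    have hmod : PySem.Int.mod (idx + 6) 6 = PySem.Int.mod idx 6 := by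
      rw [PySem.Int.mod_eq_emod_of_pos (by norm_num), PySem.Int.mod_eq_emod_of_pos (by norm_num)]
      omega
    simp only [pvA_inner, hmod]
    split_ifs with h1 h2
    · have : idx + 6 + 1 = (idx + 1) + 6 := by ring
      rw [this, ih]
    · have : idx + 6 + 1 = (idx + 1) + 6 := by ring
      rw [this, ih]
    · rfl

theorem pvStep_nonpos (S : List String)
    (st : PySem.Dict String Int × PySem.Dict String Int × Int × Int) (h : ¬ 0 < st.2.2.1) :
    S.foldl pvStep st = st := by
  induction S generalizing st with
  | nil => rfl
  | cons d S ih =>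
    have hstep : pvStep st d = st := by
      unfold pvStep
      rw [if_neg]
      intro hc
      exact h hc.1
    simp only [List.foldl_cons, hstep]
    exact ih st h

-- walking the tail of one six-position pass
theorem pvA_walk (n : Nat) : n ≤ 6 → ∀ (f : Nat) (ch r : PySem.Dict String Int) (cap tot : Int),
    pvA_inner (f + n) (((6 - n : Nat) : Int)) ch r cap tot =
      ((fun st => pvA_inner f 0 st.1 st.2.1 st.2.2.1 st.2.2.2)
        ((pvPestel.drop (6 - n)).foldl pvStep (ch, r, cap, tot))) := by
  induction n with
  | zero =>
    intro _ f ch r cap tot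
    have hdrop : pvPestel.drop 6 = [] := by simp [pvPestel]
    simp only [Nat.sub_zero, hdrop, List.foldl_nil, Nat.add_zero]
    have := pvA_shift f 0 ch r cap tot
    simpa using this
  | succ n ih =>
    intro hn f ch r cap tot
    have hj : 6 - (n + 1) < 6 := by omega
    have hlen : pvPestel.length = 6 := by rfl
    have hmod : PySem.Int.mod ((6 - (n + 1) : Nat) : Int) 6 = ((6 - (n + 1) : Nat) : Int) := by
      have h6 : ((6 - (n + 1) : Nat) : Int) < 6 := by exact_mod_cast hj
      rw [PySem.Int.mod_eq_emod_of_pos (a := ((6 - (n + 1) : Nat) : Int)) (b := 6) (by norm_num)]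
      omega
    have hget : (PySem.List.pyGet? pvPestel ((6 - (n + 1) : Nat) : Int)).getD "" =
        pvPestel[6 - (n + 1)]'(by omega) := by
      rw [PySem.List.pyGet?_natCast, List.getElem?_eq_getElem (by omega)]
      rfl
    have hdrop : pvPestel.drop (6 - (n + 1)) =
        pvPestel[6 - (n + 1)]'(by omega) :: pvPestel.drop (6 - n) := by
      have h1 : 6 - n = (6 - (n + 1)) + 1 := by omega
      rw [h1]
      exact List.drop_eq_getElem_cons (by simp [pvPestel]; omega)
    have hstep : f + (n + 1) = (f + n) + 1 := by omega
    have hcast : ((6 - (n + 1) : Nat) : Int) + 1 = ((6 - n : Nat) : Int) := by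
      push_cast [Nat.sub_add_cancel]
      omega
    rw [hstep]
    show pvA_inner ((f + n) + 1) _ ch r cap tot = _
    rw [pvA_inner]
    simp only [hmod, hget, hdrop, List.foldl_cons]
    by_cases hcap : 0 < cap
    · rw [if_pos hcap]
      by_cases hrd : 0 < r.getD (pvPestel[6 - (n + 1)]'(by omega)) 0
      · rw [if_pos hrd, hcast, ih (by omega)]
        have hps : pvStep (ch, r, cap, tot) (pvPestel[6 - (n + 1)]'(by omega)) =
            (ch.insert (pvPestel[6 - (n + 1)]'(by omega)) (ch.getD (pvPestel[6 - (n + 1)]'(by omega)) 0 + 1),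
             r.insert (pvPestel[6 - (n + 1)]'(by omega)) (r.getD (pvPestel[6 - (n + 1)]'(by omega)) 0 - 1), cap - 1, tot - 1) := by
          unfold pvStep
          rw [if_pos ⟨hcap, hrd⟩]
        rw [hps]
      · rw [if_neg hrd, hcast, ih (by omega)]
        have hps : pvStep (ch, r, cap, tot) (pvPestel[6 - (n + 1)]'(by omega)) = (ch, r, cap, tot) := by
          unfold pvStep
          rw [if_neg (fun hc => hrd hc.2)]
        rw [hps]
    · rw [if_neg hcap]
      have hps : pvStep (ch, r, cap, tot) (pvPestel[6 - (n + 1)]'(by omega)) = (ch, r, cap, tot) := by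
        unfold pvStep
        rw [if_neg (fun hc => hcap hc.1)]
      rw [hps, pvStep_nonpos _ _ hcap]
      exact (pvA_done f 0 ch r cap tot hcap).symm

-- one full pass of A's inner loop over the six positions is a fold of pvStep
theorem pvA_unroll (f : Nat) (ch r : PySem.Dict String Int) (cap tot : Int) :
    pvA_inner (f + 6) 0 ch r cap tot =
      (let st := pvPestel.foldl pvStep (ch, r, cap, tot);
        pvA_inner f 0 st.1 st.2.1 st.2.2.1 st.2.2.2) := by
  have := pvA_walk 6 (by omega) f ch r cap tot
  simpa using this

-- characterisation of the pvStep fold: the first (min cap k) active domains each yield one unit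
theorem pvFold_char (ds : List String) (hds : ds.Nodup) : ∀ (ch r : PySem.Dict String Int)
    (cap tot : Int), 0 ≤ cap →
    ds.foldl pvStep (ch, r, cap, tot) =
      ((fun S => (pvUpd ch S 1, pvUpd r S (-1), cap - S.length, tot - S.length))
        ((ds.filter (fun d => decide (0 < r.getD d 0))).take cap.toNat)) := by
  induction ds with
  | nil =>
    intro ch r cap tot hcap
    simp [pvUpd]
  | cons d ds ih =>
    intro ch r cap tot hcap
    have hd : d ∉ ds := (List.nodup_cons.mp hds).1
    have hds' : ds.Nodup := (List.nodup_cons.mp hds).2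
    simp only [List.foldl_cons, List.filter_cons]
    by_cases hcap0 : 0 < cap
    · by_cases hrd : 0 < r.getD d 0
      · have hps : pvStep (ch, r, cap, tot) d =
            (ch.insert d (ch.getD d 0 + 1), r.insert d (r.getD d 0 - 1), cap - 1, tot - 1) := by
          unfold pvStep
          rw [if_pos ⟨hcap0, hrd⟩]
        rw [hps, ih hds' _ _ _ _ (by omega)]
        have hfilt : ds.filter (fun x => decide (0 < (r.insert d (r.getD d 0 - 1)).getD x 0)) =
            ds.filter (fun x => decide (0 < r.getD x 0)) := by
          apply List.filter_congr
          intro x hx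
          have hxd : x ≠ d := fun he => hd (he ▸ hx)
          rw [PySem.Dict.getD_insert]
          simp [hxd]
        rw [hfilt]
        have htn : cap.toNat = (cap - 1).toNat + 1 := by omega
        rw [if_pos (by simpa using hrd), htn, List.take_succ_cons]
        have hupd1 : pvUpd ch ((d :: List.take ((cap-1).toNat) (ds.filter (fun x => decide (0 < r.getD x 0))))) 1 =
            pvUpd (ch.insert d (ch.getD d 0 + 1)) (List.take ((cap-1).toNat) (ds.filter (fun x => decide (0 < r.getD x 0)))) 1 := by
          rfl
        have hupd2 : pvUpd r ((d :: List.take ((cap-1).toNat) (ds.filter (fun x => decide (0 < r.getD x 0))))) (-1) =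
            pvUpd (r.insert d (r.getD d 0 - 1)) (List.take ((cap-1).toNat) (ds.filter (fun x => decide (0 < r.getD x 0)))) (-1) := by
          show pvUpd (r.insert d (r.getD d 0 + (-1))) _ (-1) = _
          rw [show r.getD d 0 + (-1) = r.getD d 0 - 1 from by ring]
        simp only [hupd1, hupd2, List.length_cons, Prod.mk.injEq]
        refine ⟨trivial, trivial, by push_cast; ring, by push_cast; ring⟩
      · have hps : pvStep (ch, r, cap, tot) d = (ch, r, cap, tot) := by
          unfold pvStep
          rw [if_neg (fun hc => hrd hc.2)]
        rw [hps, ih hds' _ _ _ _ hcap, if_neg (by simpa using hrd)]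
    · have hc0 : cap = 0 := by omega
      subst hc0
      have h1 : pvStep (ch, r, 0, tot) d = (ch, r, 0, tot) := by
        unfold pvStep
        exact if_neg (fun hc => absurd hc.1 (by norm_num))
      rw [h1, pvStep_nonpos _ _ (by norm_num)]
      simp [pvUpd]

theorem pvUpd_getD (S : List String) (hS : S.Nodup) : ∀ (t : PySem.Dict String Int) (δ : Int)
    (x : String),
    (pvUpd t S δ).getD x 0 = t.getD x 0 + (if x ∈ S then δ else 0) := by
  revert hS
  induction S with
  | nil => intro _ t δ x; simp [pvUpd]
  | cons d S ih =>
    intro hS t δ x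
    have hd : d ∉ S := (List.nodup_cons.mp hS).1
    have hS' : S.Nodup := (List.nodup_cons.mp hS).2
    show (pvUpd (t.insert d (t.getD d 0 + δ)) S δ).getD x 0 = _
    rw [ih hS' _ δ x, PySem.Dict.getD_insert]
    by_cases hx : x = d
    · subst hx
      simp [hd]
    · simp [hx, List.mem_cons]

theorem pvUpd_items (S : List String) (hS : S.Nodup) : ∀ (t : PySem.Dict String Int),
    (∀ d ∈ S, t.contains d = true) → t.keys.Nodup → ∀ (δ : Int),
    (pvUpd t S δ).items = t.items.map (fun p => if p.1 ∈ S then (p.1, p.2 + δ) else p) := by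
  revert hS
  induction S with
  | nil => intro _ t _ _ δ; simp [pvUpd]
  | cons d S ih =>
    intro hS t ht hnd δ
    have hd : d ∉ S := (List.nodup_cons.mp hS).1
    have hS' : S.Nodup := (List.nodup_cons.mp hS).2
    have hdt : t.contains d = true := ht d (List.mem_cons_self ..)
    show (pvUpd (t.insert d (t.getD d 0 + δ)) S δ).items = _
    rw [ih hS' _ (fun x hx => ?_) (PySem.Dict.nodup_keys_insert _ _ _ hnd) δ]
    · rw [PySem.Dict.items_insert_of_contains _ _ hdt, List.map_map]
      apply List.map_congr_left
      intro p hp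
      by_cases hpd : p.1 = d
      · have hval : p.2 = t.getD d 0 := by
          have : (p.1, p.2) ∈ t.items := by simpa using hp
          rw [hpd] at this
          exact (PySem.Dict.getD_of_mem_items _ this hnd 0).symm
        have h1 : (p.1 == d) = true := by simp [hpd]
        simp only [Function.comp_apply, h1, if_true]
        simp [hd, hpd, hval]
      · have h1 : (p.1 == d) = false := by simp [hpd]
        simp only [Function.comp_apply, h1, Bool.false_eq_true, if_false]
        by_cases hpS : p.1 ∈ S <;> simp [hpS, hpd, List.mem_cons]
    · rw [PySem.Dict.contains_insert]
      simp [ht x (List.mem_cons_of_mem _ hx)]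

theorem pvUpd_fresh (S : List String) (hS : S.Nodup) : ∀ (t : PySem.Dict String Int),
    (∀ d ∈ S, t.contains d = false) → ∀ (δ : Int),
    (pvUpd t S δ).items = t.items ++ S.map (fun d => (d, δ)) := by
  revert hS
  induction S with
  | nil => intro _ t _ δ; simp [pvUpd]
  | cons d S ih =>
    intro hS t ht δ
    have hd : d ∉ S := (List.nodup_cons.mp hS).1
    have hS' : S.Nodup := (List.nodup_cons.mp hS).2
    have hdt : t.contains d = false := ht d (List.mem_cons_self ..)
    show (pvUpd (t.insert d (t.getD d 0 + δ)) S δ).items = _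
    rw [ih hS' _ (fun x hx => ?_) δ]
    · rw [PySem.Dict.items_insert_of_not_contains _ _ hdt,
        PySem.Dict.getD_of_not_contains _ _ hdt]
      simp
    · rw [PySem.Dict.contains_insert]
      have : x ≠ d := fun he => hd (he ▸ hx)
      simp [this, ht x (List.mem_cons_of_mem _ hx)]

theorem pvUpd_keys (S : List String) (hS : S.Nodup) (t : PySem.Dict String Int)
    (ht : ∀ d ∈ S, t.contains d = true) (hnd : t.keys.Nodup) (δ : Int) :
    (pvUpd t S δ).keys = t.keys := by
  have h := pvUpd_items S hS t ht hnd δ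
  show (pvUpd t S δ).items.map Prod.fst = t.items.map Prod.fst
  rw [h, List.map_map]
  apply List.map_congr_left
  intro p _
  by_cases hp : p.1 ∈ S <;> simp [hp]

theorem pvUpd_zero (S : List String) (hS : S.Nodup) (t : PySem.Dict String Int)
    (ht : ∀ d ∈ S, t.contains d = true) (hnd : t.keys.Nodup) :
    pvUpd t S 0 = t := by
  apply PySem.Dict.ext
  rw [pvUpd_items S hS t ht hnd 0]
  have : ∀ p ∈ t.items, (if p.1 ∈ S then (p.1, p.2 + (0:Int)) else p) = p := by
    intro p _
    by_cases hp : p.1 ∈ S <;> simp [hp]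
  rw [List.map_congr_left this]
  simp

theorem pvUpd_collapse (S : List String) (hS : S.Nodup) (t : PySem.Dict String Int)
    (ht : ∀ d ∈ S, t.contains d = true) (hnd : t.keys.Nodup) (δ δ' : Int) :
    pvUpd (pvUpd t S δ) S δ' = pvUpd t S (δ + δ') := by
  have hkeys := pvUpd_keys S hS t ht hnd δ
  have hnd' : (pvUpd t S δ).keys.Nodup := hkeys ▸ hnd
  have ht' : ∀ d ∈ S, (pvUpd t S δ).contains d = true := by
    intro d hd
    rw [PySem.Dict.contains_eq_decide_mem_keys, hkeys]
    rw [← PySem.Dict.contains_eq_decide_mem_keys]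
    exact ht d hd
  apply PySem.Dict.ext
  rw [pvUpd_items S hS _ ht' hnd' δ', pvUpd_items S hS t ht hnd δ,
    pvUpd_items S hS t ht hnd (δ + δ'), List.map_map]
  apply List.map_congr_left
  intro p _
  by_cases hp : p.1 ∈ S <;> simp [hp] <;> ring

-- a dict with a positive lookup contains the key
theorem pvContains_of_pos (r : PySem.Dict String Int) (d : String) (h : 0 < r.getD d 0) :
    r.contains d = true := by
  by_contra hc
  have : r.contains d = false := by
    cases hcd : r.contains d
    · rfl
    · exact absurd hcd hc
  rw [PySem.Dict.getD_of_not_contains _ _ this] at h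
  omega

-- filtering a nodup list by membership in one of its sublists gives back the sublist
theorem pvFilterMem (S L : List String) (hsub : S.Sublist L) (hnd : L.Nodup) :
    L.filter (fun x => decide (x ∈ S)) = S := by
  induction L generalizing S with
  | nil =>
    have := List.sublist_nil.mp hsub
    subst this
    rfl
  | cons a L ih =>
    have haL : a ∉ L := (List.nodup_cons.mp hnd).1
    have hndL : L.Nodup := (List.nodup_cons.mp hnd).2
    cases hsub with
    | cons _ h =>
      have ha : a ∉ S := fun haS => haL (h.subset haS)
      simp only [List.filter_cons, decide_eq_true_eq]
      rw [if_neg (by simpa using ha)]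
      exact ih S h hndL
    | cons₂ _ h =>
      rename_i S'
      simp only [List.filter_cons]
      rw [if_pos (by simp)]
      have : L.filter (fun x => decide (x ∈ a :: S')) = L.filter (fun x => decide (x ∈ S')) := by
        apply List.filter_congr
        intro x hx
        have : x ≠ a := fun he => haL (he ▸ hx)
        simp [this]
      rw [this, ih S' h hndL]

theorem pvSumIte (δ : Int) (S : List String) : ∀ (L : List String),
    (L.map (fun d => if d ∈ S then δ else 0)).sum = δ * (L.countP (fun d => decide (d ∈ S))) := by
  intro L
  induction L with
  | nil => simp
  | cons a L ih =>
    simp only [List.map_cons, List.sum_cons, List.countP_cons, ih]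
    by_cases ha : a ∈ S <;> simp [ha] <;> ring

theorem pvPos_upd (S : List String) (hS : S.Nodup) (hsub : S.Sublist pvPestel)
    (r : PySem.Dict String Int) (δ : Int) (hδ : 0 ≤ δ)
    (hr : ∀ d ∈ S, δ ≤ r.getD d 0) :
    pvPos (pvUpd r S (-δ)) = pvPos r - δ * S.length := by
  unfold pvPos
  have hcong : ∀ d ∈ pvPestel, max ((pvUpd r S (-δ)).getD d 0) 0 =
      max (r.getD d 0) 0 + (if d ∈ S then -δ else 0) := by
    intro d _
    rw [pvUpd_getD S hS r (-δ) d]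
    by_cases hdS : d ∈ S
    · have h1 : δ ≤ r.getD d 0 := hr d hdS
      simp only [hdS, if_true]
      omega
    · simp [hdS]
  rw [List.map_congr_left hcong, PySem.List.sum_map_add_int, pvSumIte (-δ) S pvPestel,
    List.countP_eq_length_filter, pvFilterMem S pvPestel hsub (by decide)]
  ring

-- invariant preservation for one allocation phase
theorem pvPhase (a b : PySem.Dict String Int) (S : List String) (n : Nat)
    (r : PySem.Dict String Int) (hS : S = (pvAct r).take n) (hinv : pvInv a b)
    (halt : (∀ d, a.getD d 0 = 0) ∨ (∀ d ∈ S, 0 < a.getD d 0)) (δ : Int) (hδ : 1 ≤ δ) :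
    pvInv (pvUpd a S δ) (pvUpd b S δ) := by
  obtain ⟨hka, hgd, hnn, hbi⟩ := hinv
  have hndA : pvPestel.Nodup := by decide
  have hSsub : S.Sublist pvPestel := by
    rw [hS]
    exact (List.take_sublist _ _).trans (by unfold pvAct; exact List.filter_sublist)
  have hSnd : S.Nodup := hSsub.nodup hndA
  have hndaK : a.keys.Nodup := by rw [hka]; exact hndA
  have hcontA : ∀ d ∈ S, a.contains d = true := by
    intro d hdS
    rw [PySem.Dict.contains_eq_decide_mem_keys, hka]
    simp [hSsub.subset hdS]
  have hgetA : ∀ x, (pvUpd a S δ).getD x 0 = a.getD x 0 + (if x ∈ S then δ else 0) :=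
    pvUpd_getD S hSnd a δ
  refine ⟨?_, ?_, ?_, ?_⟩
  · rw [pvUpd_keys S hSnd a hcontA hndaK δ]
    exact hka
  · intro x
    rw [hgetA x, pvUpd_getD S hSnd b δ x, hgd x]
  · intro x
    rw [hgetA x]
    have := hnn x
    by_cases hx : x ∈ S <;> simp [hx] <;> omega
  · cases halt with
    | inl hz =>
      have hb0 : b.items = [] := by
        rw [hbi]
        have h0 : pvPestel.filter (fun d => decide (0 < a.getD d 0)) = [] := by
          apply List.filter_eq_nil_iff.mpr
          intro d _
          simp [hz d]
        rw [h0]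
        rfl
      have hcontB : ∀ d ∈ S, b.contains d = false := by
        intro d _
        rw [PySem.Dict.contains_eq_decide_mem_keys]
        have hk0 : b.keys = [] := by
          show b.items.map Prod.fst = []
          rw [hb0]
          rfl
        simp [hk0]
      rw [pvUpd_fresh S hSnd b hcontB δ, hb0]
      have hfilt : pvPestel.filter (fun d => decide (0 < (pvUpd a S δ).getD d 0)) = S := by
        have h1 : pvPestel.filter (fun d => decide (0 < (pvUpd a S δ).getD d 0)) =
            pvPestel.filter (fun d => decide (d ∈ S)) := by
          apply List.filter_congr
          intro d _
          rw [hgetA d, hz d]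
          by_cases hdS : d ∈ S <;> simp [hdS] <;> omega
        rw [h1, pvFilterMem S pvPestel hSsub hndA]
      rw [hfilt]
      simp only [List.nil_append]
      apply List.map_congr_left
      intro d hdS
      rw [hgetA d, hz d]
      simp [hdS]
    | inr hpos =>
      have hkb : b.keys = pvPestel.filter (fun d => decide (0 < a.getD d 0)) := by
        show b.items.map Prod.fst = _
        rw [hbi, List.map_map]
        have hcomp : (Prod.fst ∘ fun d : String => (d, a.getD d 0)) = id := rfl
        rw [hcomp, List.map_id]
      have hndbK : b.keys.Nodup := by
        rw [hkb]
        exact hndA.filter _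
      have hcontB : ∀ d ∈ S, b.contains d = true := by
        intro d hdS
        rw [PySem.Dict.contains_eq_decide_mem_keys, hkb]
        simp [List.mem_filter, hSsub.subset hdS, hpos d hdS]
      rw [pvUpd_items S hSnd b hcontB hndbK δ, hbi, List.map_map]
      have hfilt : pvPestel.filter (fun d => decide (0 < (pvUpd a S δ).getD d 0)) =
          pvPestel.filter (fun d => decide (0 < a.getD d 0)) := by
        apply List.filter_congr
        intro d _
        rw [hgetA d]
        by_cases hdS : d ∈ S
        · have := hpos d hdS
          simp only [hdS, if_true, decide_eq_decide]
          omega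
        · simp [hdS]
      rw [hfilt]
      apply List.map_congr_left
      intro d hdf
      by_cases hdS : d ∈ S <;> simp [hdS, hgetA d]

-- A runs m full cycles at once
theorem pvA_multi (m : Nat) : ∀ (f : Nat) (a r : PySem.Dict String Int) (cap tot : Int),
    a.keys = pvPestel → r.keys.Nodup → (∀ d ∈ pvAct r, (m : Int) ≤ r.getD d 0) →
    (m : Int) * (pvAct r).length ≤ cap →
    pvA_inner (f + 6 * m) 0 a r cap tot =
      pvA_inner f 0 (pvUpd a (pvAct r) m) (pvUpd r (pvAct r) (-(m : Int)))
        (cap - m * (pvAct r).length) (tot - m * (pvAct r).length) := by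
  induction m with
  | zero =>
    intro f a r cap tot hka hndr hmr hcap
    have hndA : pvPestel.Nodup := by decide
    have hactsub : (pvAct r).Sublist pvPestel := by
      unfold pvAct
      exact List.filter_sublist
    have hactnd : (pvAct r).Nodup := hactsub.nodup hndA
    have hcontA : ∀ d ∈ pvAct r, a.contains d = true := by
      intro d hd
      rw [PySem.Dict.contains_eq_decide_mem_keys, hka]
      simp [hactsub.subset hd]
    have hcontR : ∀ d ∈ pvAct r, r.contains d = true := by
      intro d hd
      apply pvContains_of_pos
      have h2 : d ∈ pvPestel ∧ 0 < r.getD d 0 := by simpa [pvAct] using hd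
      exact h2.2
    rw [show ((0 : Nat) : Int) = 0 from rfl, show (-(0:Int)) = 0 from rfl]
    rw [pvUpd_zero _ hactnd a hcontA (hka ▸ hndA), pvUpd_zero _ hactnd r hcontR hndr]
    norm_num
  | succ m ih =>
    intro f a r cap tot hka hndr hmr hcap
    have hndA : pvPestel.Nodup := by decide
    have hactsub : (pvAct r).Sublist pvPestel := by
      unfold pvAct
      exact List.filter_sublist
    have hactnd : (pvAct r).Nodup := hactsub.nodup hndA
    have hcontA : ∀ d ∈ pvAct r, a.contains d = true := by
      intro d hd
      rw [PySem.Dict.contains_eq_decide_mem_keys, hka]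
      simp [hactsub.subset hd]
    have hcontR : ∀ d ∈ pvAct r, r.contains d = true := by
      intro d hd
      apply pvContains_of_pos
      have h2 : d ∈ pvPestel ∧ 0 < r.getD d 0 := by simpa [pvAct] using hd
      exact h2.2
    have hk0 : (0 : Int) ≤ (pvAct r).length := by positivity
    have hm1 : (1 : Int) ≤ ((m + 1 : Nat) : Int) := by push_cast; omega
    have hcap0 : 0 ≤ cap := le_trans (by positivity) hcap
    have hstep : f + 6 * (m + 1) = (f + 6 * m) + 6 := by omega
    rw [hstep, pvA_unroll]
    rw [pvFold_char pvPestel hndA a r cap tot hcap0]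
    have hkle : (pvAct r).length ≤ cap.toNat := by
      have : ((pvAct r).length : Int) ≤ cap := by
        calc ((pvAct r).length : Int) = 1 * (pvAct r).length := by ring
        _ ≤ ((m + 1 : Nat) : Int) * (pvAct r).length := by
            apply mul_le_mul_of_nonneg_right hm1 hk0
        _ ≤ cap := hcap
      omega
    have htake : (pvPestel.filter (fun d => decide (0 < r.getD d 0))).take cap.toNat = pvAct r := by
      apply List.take_of_length_le
      exact hkle
    simp only [htake]
    by_cases hm0 : m = 0
    · subst hm0
      norm_num
    set a1 := pvUpd a (pvAct r) 1 with ha1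
    set r1 := pvUpd r (pvAct r) (-1) with hr1
    have hka1 : a1.keys = pvPestel := by
      rw [ha1, pvUpd_keys _ hactnd a hcontA (hka ▸ hndA) 1]
      exact hka
    have hkr1 : r1.keys = r.keys := by
      rw [hr1, pvUpd_keys _ hactnd r hcontR hndr (-1)]
    have hndr1 : r1.keys.Nodup := hkr1 ▸ hndr
    have hget1 : ∀ x, r1.getD x 0 = r.getD x 0 + (if x ∈ pvAct r then (-1 : Int) else 0) :=
      pvUpd_getD _ hactnd r (-1)
    have hact1 : pvAct r1 = pvAct r := by
      unfold pvAct
      apply List.filter_congr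
      intro d hd
      rw [hget1 d]
      by_cases hdS : d ∈ pvAct r
      · have h1 : 0 < r.getD d 0 := by
          have h2 : d ∈ pvPestel ∧ 0 < r.getD d 0 := by simpa [pvAct] using hdS
          exact h2.2
        have h2 : ((m + 1 : Nat) : Int) ≤ r.getD d 0 := hmr d hdS
        have h3 : 1 ≤ m := Nat.one_le_iff_ne_zero.mpr hm0
        simp only [hdS, if_true, decide_eq_decide]
        push_cast at h2
        omega
      · simp [hdS]
    have hmr1 : ∀ d ∈ pvAct r1, (m : Int) ≤ r1.getD d 0 := by
      intro d hd
      rw [hact1] at hd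
      rw [hget1 d]
      have h2 : ((m + 1 : Nat) : Int) ≤ r.getD d 0 := hmr d hd
      push_cast at h2 ⊢
      simp only [hd, if_true]
      omega
    have hcap1 : (m : Int) * (pvAct r1).length ≤ cap - (pvAct r).length := by
      rw [hact1]
      push_cast at hcap ⊢
      nlinarith
    have := ih f a1 r1 (cap - (pvAct r).length) (tot - (pvAct r).length) hka1 hndr1 hmr1 hcap1
    rw [hact1] at this
    rw [this]
    have hcA : pvUpd a1 (pvAct r) (m : Int) = pvUpd a (pvAct r) ((m + 1 : Nat) : Int) := by
      rw [ha1, pvUpd_collapse _ hactnd a hcontA (hka ▸ hndA) 1 (m : Int)]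
      congr 1
      push_cast
      ring
    have hcR : pvUpd r1 (pvAct r) (-(m : Int)) = pvUpd r (pvAct r) (-((m + 1 : Nat) : Int)) := by
      rw [hr1, pvUpd_collapse _ hactnd r hcontR hndr (-1) (-(m : Int))]
      congr 1
      push_cast
      ring
    rw [hcA, hcR]
    congr 1 <;> push_cast <;> ring

-- the terminal partial phase (capacity below the number of active domains)
theorem pvTerm (a b r : PySem.Dict String Int) (cap tot : Int) (fA fB : Nat)
    (hc0 : 0 < cap) (hck : cap < (pvAct r).length) (hinv : pvInv a b)
    (halt : (∀ d, a.getD d 0 = 0) ∨ (∀ d ∈ pvAct r, 0 < a.getD d 0))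
    (hrk : r.keys = pvPestel) (hfA : 6 ≤ fA) (hfB : 2 ≤ fB) :
    ∃ a' b' r', pvA_inner fA 0 a r cap tot = (a', r', tot - cap) ∧
      pvB_inner fB b r cap = (b', r') ∧ pvInv a' b' ∧
      pvPos r' = pvPos r - cap ∧ r'.keys = pvPestel := by
  have hndA : pvPestel.Nodup := by decide
  have hactsub : (pvAct r).Sublist pvPestel := by
    unfold pvAct
    exact List.filter_sublist
  have hactnd : (pvAct r).Nodup := hactsub.nodup hndA
  set S := (pvAct r).take cap.toNat with hSdef
  have hSsub : S.Sublist pvPestel := (List.take_sublist _ _).trans hactsub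
  have hSnd : S.Nodup := hSsub.nodup hndA
  have hSact : ∀ d ∈ S, d ∈ pvAct r := fun d hd => (List.take_subset _ _) hd
  have hSpos : ∀ d ∈ S, 0 < r.getD d 0 := by
    intro d hd
    have h2 : d ∈ pvPestel ∧ 0 < r.getD d 0 := by simpa [pvAct] using hSact d hd
    exact h2.2
  have hcontR : ∀ d ∈ S, r.contains d = true := fun d hd => pvContains_of_pos r d (hSpos d hd)
  have hlenS : S.length = cap.toNat := by
    rw [hSdef, List.length_take]
    omega
  have hlenSi : (S.length : Int) = cap := by
    rw [hlenS]
    omega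
  -- A side
  obtain ⟨fA', rfl⟩ : ∃ k, fA = k + 6 := ⟨fA - 6, by omega⟩
  rw [pvA_unroll, pvFold_char pvPestel hndA a r cap tot (by omega)]
  have hfilt : pvPestel.filter (fun d => decide (0 < r.getD d 0)) = pvAct r := rfl
  simp only [hfilt, ← hSdef, hlenSi]
  rw [pvA_done _ _ _ _ _ _ (by omega)]
  -- B side
  obtain ⟨fB', rfl⟩ : ∃ k, fB = k + 1 := ⟨fB - 1, by omega⟩
  rw [pvB_inner]
  rw [if_pos hc0]
  have hk0 : (0 : Int) < ((pvAct r).length : Int) := by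
    have := hck
    omega
  have hdiv0 : PySem.Int.floordiv cap ((pvAct r).length : Int) = 0 := by
    have hlt : PySem.Int.floordiv cap ((pvAct r).length : Int) < 1 := by
      rw [PySem.Int.floordiv_lt_iff_lt_mul hk0]
      omega
    have hge : (0 : Int) ≤ PySem.Int.floordiv cap ((pvAct r).length : Int) := by
      rw [PySem.Int.le_floordiv_iff_mul_le hk0]
      omega
    omega
  have hmr0 : 0 ≤ ((PySem.List.min? ((pvAct r).map (fun d => r.getD d 0)) (fun x => x)).getD 0) := by
    cases hmin : PySem.List.min? ((pvAct r).map (fun d => r.getD d 0)) (fun x => x) with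
    | none => simp
    | some m =>
      have hm : m ∈ (pvAct r).map (fun d => r.getD d 0) := PySem.List.min?_mem hmin
      obtain ⟨d, hd, hdm⟩ := List.mem_map.mp hm
      have h2 : d ∈ pvPestel ∧ 0 < r.getD d 0 := by simpa [pvAct] using hd
      simp only [Option.getD_some]
      omega
  have hrounds : min (PySem.Int.floordiv cap ((pvAct r).length : Int))
      ((PySem.List.min? ((pvAct r).map (fun d => r.getD d 0)) (fun x => x)).getD 0) = 0 := by
    rw [hdiv0]
    omega
  simp only [pvAct] at hrounds
  simp only [hrounds, lt_irrefl, if_false]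
  have hslice : PySem.List.slice (pvPestel.filter (fun d => decide (0 < r.getD d 0))) none (some cap) = S := by
    rw [PySem.List.slice_to _ (by omega)]
    rfl
  rw [hslice]
  rw [PySem.List.foldl_prod_mk (f := fun t d => PySem.Dict.insert t d (t.getD d 0 + 1))
    (g := fun t d => PySem.Dict.insert t d (t.getD d 0 - 1))]
  have hgfold : S.foldl (fun t d => PySem.Dict.insert t d (t.getD d 0 - 1)) r = pvUpd r S (-1) := by
    unfold pvUpd
    apply PySem.List.foldl_congr_mem
    intro t d _
    congr 1
  rw [hgfold, pvB_done _ _ _ _ (by norm_num)]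
  refine ⟨pvUpd a S 1, pvUpd b S 1, pvUpd r S (-1), rfl, rfl, ?_, ?_, ?_⟩
  · apply pvPhase a b S cap.toNat r hSdef hinv ?_ 1 (by norm_num)
    cases halt with
    | inl hz => exact Or.inl hz
    | inr hp => exact Or.inr (fun d hd => hp d (hSact d hd))
  · rw [pvPos_upd S hSnd hSsub r 1 (by norm_num) (fun d hd => hSpos d hd), hlenSi]
    ring
  · rw [pvUpd_keys S hSnd r hcontR (hrk ▸ hndA) (-1)]
    exact hrk

-- a strict countP comparison used to show the active set shrinks
theorem pvCountLt (p q : String → Bool) (d0 : String) : ∀ (L : List String),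
    (∀ x ∈ L, p x = true → q x = true) → d0 ∈ L → q d0 = true → p d0 = false →
    L.countP p < L.countP q := by
  intro L
  induction L with
  | nil => intro _ h; cases h
  | cons a L ihL =>
    intro himp hmem hq hp
    rcases List.mem_cons.mp hmem with h0 | h0
    · subst h0
      have hle : L.countP p ≤ L.countP q :=
        List.countP_mono_left (fun x hx => himp x (List.mem_cons_of_mem _ hx))
      simp [hq, hp]
      omega
    · have hlt : L.countP p < L.countP q :=
        ihL (fun x hx => himp x (List.mem_cons_of_mem _ hx)) h0 hq hp
      simp only [List.countP_cons]
      by_cases hpa : p a = true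
      · have hqa : q a = true := himp a (List.mem_cons_self ..) hpa
        simp [hpa, hqa]
        omega
      · simp only [Bool.not_eq_true] at hpa
        by_cases hqa : q a = true
        · simp [hpa, hqa]
          omega
        · simp only [Bool.not_eq_true] at hqa
          simp [hpa, hqa]
          omega

-- one arithmetic phase of B's inner loop, in closed form
theorem pvB_phase_eq (fB' : Nat) (b r : PySem.Dict String Int) (cap m : Int) (hcz : 0 < cap)
    (hmin : PySem.List.min? ((pvAct r).map (fun d => r.getD d 0)) (fun x => x) = some m)
    (hr0 : 0 < min (PySem.Int.floordiv cap ((pvAct r).length : Int)) m) :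
    pvB_inner (fB' + 1) b r cap = pvB_inner fB'
      (pvUpd b (pvAct r) (min (PySem.Int.floordiv cap ((pvAct r).length : Int)) m))
      (pvUpd r (pvAct r) (-(min (PySem.Int.floordiv cap ((pvAct r).length : Int)) m)))
      (cap - (min (PySem.Int.floordiv cap ((pvAct r).length : Int)) m) * ((pvAct r).length : Int)) := by
  have hActDef : pvPestel.filter (fun d => decide (0 < r.getD d 0)) = pvAct r := rfl
  rw [pvB_inner, if_pos hcz]
  simp only [hActDef, hmin, Option.getD_some]
  rw [if_pos hr0]
  rw [PySem.List.foldl_prod_mk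
    (f := fun t d => PySem.Dict.insert t d (t.getD d 0 +
      min (PySem.Int.floordiv cap ((pvAct r).length : Int)) m))
    (g := fun t d => PySem.Dict.insert t d (t.getD d 0 -
      min (PySem.Int.floordiv cap ((pvAct r).length : Int)) m))]
  rfl

-- the main inner-loop equivalence
theorem pvInner (n : Nat) : ∀ (cap : Int), cap.toNat = n →
    ∀ (fA fB : Nat) (a b r : PySem.Dict String Int) (tot : Int),
    0 ≤ cap → cap ≤ pvPos r → pvInv a b →
    ((∀ d, a.getD d 0 = 0) ∨ (∀ d ∈ pvAct r, 0 < a.getD d 0)) →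
    r.keys = pvPestel →
    6 * cap.toNat + 6 ≤ fA → (pvAct r).length + 2 ≤ fB →
    ∃ a' b' r', pvA_inner fA 0 a r cap tot = (a', r', tot - cap) ∧
      pvB_inner fB b r cap = (b', r') ∧ pvInv a' b' ∧
      pvPos r' = pvPos r - cap ∧ r'.keys = pvPestel := by
  induction n using Nat.strong_induction_on with
  | _ n ih =>
  intro cap hn fA fB a b r tot hc0 hcpos hinv halt hrk hfA hfB
  have hndA : pvPestel.Nodup := by decide
  by_cases hcz : 0 < cap
  · -- active set is nonempty
    have hactpos : 0 < (pvAct r).length := by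
      by_contra hle
      have hnil : pvAct r = [] := by
        cases hAct : pvAct r with
        | nil => rfl
        | cons x xs => rw [hAct] at hle; simp at hle
      have hzero : ∀ d ∈ pvPestel, max (r.getD d 0) 0 = 0 := by
        intro d hd
        have : ¬ (0 < r.getD d 0) := by
          intro hpos
          have : d ∈ pvAct r := by
            unfold pvAct
            simp [List.mem_filter, hd, hpos]
          rw [hnil] at this
          cases this
        omega
      have hps : pvPos r = 0 := by
        unfold pvPos
        rw [List.map_congr_left hzero]
        simp
      rw [hps] at hcpos
      omega
    have hk1 : (1 : Int) ≤ ((pvAct r).length : Int) := by exact_mod_cast hactpos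
    -- minimum of the active values
    obtain ⟨m, hmin⟩ : ∃ m, PySem.List.min? ((pvAct r).map (fun d => r.getD d 0)) (fun x => x) = some m := by
      cases hm : PySem.List.min? ((pvAct r).map (fun d => r.getD d 0)) (fun x => x) with
      | none =>
        exfalso
        have := (PySem.List.min?_eq_none_iff _ _).mp hm
        have hne : pvAct r ≠ [] := by
          intro hq
          rw [hq] at hactpos
          simp at hactpos
        exact hne (List.map_eq_nil_iff.mp this)
      | some m => exact ⟨m, rfl⟩
    have hm_le : ∀ d ∈ pvAct r, m ≤ r.getD d 0 := by
      intro d hd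
      have := PySem.List.min?_isMin hmin (r.getD d 0) (List.mem_map_of_mem hd)
      simpa using this
    have hm1 : (1 : Int) ≤ m := by
      have hmem := PySem.List.min?_mem hmin
      obtain ⟨d0, hd0, hd0m⟩ := List.mem_map.mp hmem
      have h2 : d0 ∈ pvPestel ∧ 0 < r.getD d0 0 := by simpa [pvAct] using hd0
      omega
    have hSposAct : ∀ d ∈ pvAct r, 0 < r.getD d 0 := by
      intro d hd
      have h2 : d ∈ pvPestel ∧ 0 < r.getD d 0 := by simpa [pvAct] using hd
      exact h2.2
    have hcontR : ∀ d ∈ pvAct r, r.contains d = true :=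
      fun d hd => pvContains_of_pos r d (hSposAct d hd)
    have hactsub : (pvAct r).Sublist pvPestel := by
      unfold pvAct
      exact List.filter_sublist
    have hactnd : (pvAct r).Nodup := hactsub.nodup hndA
    set k : Int := ((pvAct r).length : Int) with hkdef
    set rounds : Int := min (PySem.Int.floordiv cap k) m with hrdef
    have hfd0 : 0 ≤ PySem.Int.floordiv cap k := by
      rw [PySem.Int.le_floordiv_iff_mul_le (by omega)]
      omega
    by_cases hr0 : 0 < rounds
    · -- at least one full round: batch phase on both sides
      have hrk_le : rounds * k ≤ cap := by
        have h1 : rounds ≤ PySem.Int.floordiv cap k := min_le_left _ _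
        exact (PySem.Int.le_floordiv_iff_mul_le (by omega)).mp h1
      have hrm : rounds ≤ m := min_le_right _ _
      have hrtoNat : ((rounds.toNat : Nat) : Int) = rounds := by omega
      have hrk1 : rounds ≤ rounds * k := by nlinarith
      have h6r : 6 * rounds.toNat ≤ fA - 6 := by
        have h1 : rounds ≤ cap := le_trans hrk1 hrk_le
        omega
      obtain ⟨fA1, hfA1⟩ : ∃ g, fA = g + 6 * rounds.toNat := ⟨fA - 6 * rounds.toNat, by omega⟩
      have hmulti := pvA_multi rounds.toNat fA1 a r cap tot hinv.1 (hrk ▸ hndA)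
        (fun d hd => by rw [hrtoNat]; exact le_trans hrm (hm_le d hd))
        (by rw [hrtoNat]; exact hrk_le)
      rw [hrtoNat] at hmulti
      obtain ⟨fB', hfB'⟩ : ∃ g, fB = g + 1 := ⟨fB - 1, by omega⟩
      have hphaseB := pvB_phase_eq fB' b r cap m hcz hmin hr0
      set a1 := pvUpd a (pvAct r) rounds with ha1
      set b1 := pvUpd b (pvAct r) rounds with hb1
      set r1 := pvUpd r (pvAct r) (-rounds) with hr1
      set cap1 := cap - rounds * k with hcap1def
      -- state facts
      have hrk1' : r1.keys = pvPestel := by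
        rw [hr1, pvUpd_keys _ hactnd r hcontR (hrk ▸ hndA) (-rounds)]
        exact hrk
      have hget1 : ∀ x, r1.getD x 0 = r.getD x 0 + (if x ∈ pvAct r then -rounds else 0) :=
        pvUpd_getD _ hactnd r (-rounds)
      have hgeta1 : ∀ x, a1.getD x 0 = a.getD x 0 + (if x ∈ pvAct r then rounds else 0) :=
        pvUpd_getD _ hactnd a rounds
      have hpos1 : pvPos r1 = pvPos r - rounds * k := by
        rw [hr1, pvPos_upd _ hactnd hactsub r rounds (by omega)
          (fun d hd => le_trans hrm (hm_le d hd))]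
      have hinv1 : pvInv a1 b1 := by
        rw [ha1, hb1]
        exact pvPhase a b (pvAct r) (pvAct r).length r (List.take_length.symm) hinv
          (by
            cases halt with
            | inl hz => exact Or.inl hz
            | inr hp => exact Or.inr hp) rounds (by omega)
      have hsub1 : ∀ d ∈ pvAct r1, d ∈ pvAct r := by
        intro d hd
        have h2 : d ∈ pvPestel ∧ 0 < r1.getD d 0 := by simpa [pvAct] using hd
        have h3 := hget1 d
        by_cases hdS : d ∈ pvAct r
        · exact hdS
        · exfalso
          rw [if_neg hdS, add_zero] at h3
          have : d ∈ pvAct r := by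
            unfold pvAct
            simp [List.mem_filter, h2.1]
            omega
          exact hdS this
      have halt1 : (∀ d, a1.getD d 0 = 0) ∨ (∀ d ∈ pvAct r1, 0 < a1.getD d 0) := by
        refine Or.inr ?_
        intro d hd
        have hda := hsub1 d hd
        rw [hgeta1 d, if_pos hda]
        have := hinv.2.2.1 d
        omega
      have hc1nn : 0 ≤ cap1 := by omega
      have hc1pos : cap1 ≤ pvPos r1 := by
        rw [hpos1]
        omega
      by_cases hc1 : 0 < cap1
      · -- still capacity left after the full rounds
        have hkd : rounds = PySem.Int.floordiv cap k ∨ rounds = m := by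
          rw [hrdef]
          rcases le_total (PySem.Int.floordiv cap k) m with h | h
          · exact Or.inl (min_eq_left h)
          · exact Or.inr (min_eq_right h)
        by_cases hshrink : ∃ d ∈ pvAct r, r.getD d 0 = rounds
        · -- some active domain is exhausted: recurse on strictly smaller capacity
          obtain ⟨d0, hd0, hd0r⟩ := hshrink
          have hlen1 : (pvAct r1).length < (pvAct r).length := by
            have himp : ∀ x ∈ pvPestel,
                (fun x => decide (0 < r1.getD x 0)) x = true →
                (fun x => decide (0 < r.getD x 0)) x = true := by
              intro x hx hpx
              simp only [decide_eq_true_eq] at hpx ⊢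
              have h3 := hget1 x
              by_cases hdS : x ∈ pvAct r
              · exact hSposAct x hdS
              · rw [if_neg hdS, add_zero] at h3
                omega
            have hq : decide (0 < r.getD d0 0) = true := by
              simp [hSposAct d0 hd0]
            have hp : decide (0 < r1.getD d0 0) = false := by
              have h3 := hget1 d0
              rw [if_pos hd0] at h3
              simp
              omega
            have hd0p : d0 ∈ pvPestel := hactsub.subset hd0
            have := pvCountLt (fun x => decide (0 < r1.getD x 0))
              (fun x => decide (0 < r.getD x 0)) d0 pvPestel himp hd0p hq hp
            unfold pvAct
            simpa [← List.countP_eq_length_filter] using this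
          have hfB1 : (pvAct r1).length + 2 ≤ fB' := by omega
          have hcapdec : cap1 < cap := by omega
          have hfA1bound : 6 * cap1.toNat + 6 ≤ fA1 := by
            have h1 : cap1 ≤ cap - rounds := by omega
            omega
          obtain ⟨a2, b2, r2, hA2, hB2, hinv2, hpos2, hkeys2⟩ :=
            ih cap1.toNat (by omega) cap1 rfl fA1 fB' a1 b1 r1 (tot - rounds * k)
              hc1nn hc1pos hinv1 halt1 hrk1' hfA1bound hfB1
          refine ⟨a2, b2, r2, ?_, ?_, hinv2, ?_, hkeys2⟩
          · rw [hfA1, hmulti]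
            try rw [← hkdef]
            try rw [← hcap1def]
            rw [hA2]
            simp only [Prod.mk.injEq]
            refine ⟨trivial, trivial, by omega⟩
          · rw [hfB', hphaseB]
            try rw [← hkdef]
            try rw [← hrdef]
            try rw [← hb1]
            try rw [← hr1]
            try rw [← hcap1def]
            exact hB2
          · rw [hpos2, hpos1]
            omega
        · -- no domain exhausted: remainder is below the active count, terminal phase
          have hrfd : rounds = PySem.Int.floordiv cap k := by
            rcases hkd with h | h
            · exact h
            · exfalso
              obtain ⟨d0, hd0, hd0m⟩ := List.mem_map.mp (PySem.List.min?_mem hmin)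
              exact hshrink ⟨d0, hd0, by omega⟩
          have hcap1mod : cap1 = PySem.Int.mod cap k := by
            have := PySem.Int.floordiv_mul_add_mod cap k
            rw [hcap1def, hrfd]
            omega
          have hck1 : cap1 < k := by
            have := PySem.Int.mod_lt (a := cap) (b := k) (by omega)
            omega
          have hact_eq : pvAct r1 = pvAct r := by
            unfold pvAct
            apply List.filter_congr
            intro d hd
            rw [hget1 d]
            by_cases hdS : d ∈ pvAct r
            · have h1 := hSposAct d hdS
              have h2 := hm_le d hdS
              have h3 : r.getD d 0 ≠ rounds := fun he => hshrink ⟨d, hdS, he⟩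
              simp only [hdS, if_true, decide_eq_decide]
              omega
            · simp [hdS]
          obtain ⟨a2, b2, r2, hA2, hB2, hinv2, hpos2, hkeys2⟩ :=
            pvTerm a1 b1 r1 cap1 (tot - rounds * k) fA1 fB' hc1
              (by rw [hact_eq]; exact_mod_cast hck1) hinv1
              (by
                cases halt1 with
                | inl hz => exact Or.inl hz
                | inr hp => exact Or.inr hp)
              hrk1' (by omega) (by omega)
          refine ⟨a2, b2, r2, ?_, ?_, hinv2, ?_, hkeys2⟩
          · rw [hfA1, hmulti]
            try rw [← hkdef]
            try rw [← hcap1def]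
            rw [hA2]
            simp only [Prod.mk.injEq]
            refine ⟨trivial, trivial, by omega⟩
          · rw [hfB', hphaseB]
            try rw [← hkdef]
            try rw [← hrdef]
            try rw [← hb1]
            try rw [← hr1]
            try rw [← hcap1def]
            exact hB2
          · rw [hpos2, hpos1]
            omega
      · -- capacity exactly consumed
        have hc1z : cap1 = 0 := by omega
        refine ⟨a1, b1, r1, ?_, ?_, hinv1, ?_, hrk1'⟩
        · rw [hfA1, hmulti]
          try rw [← hkdef]
          try rw [← hcap1def]
          rw [pvA_done _ _ _ _ _ _ (by omega)]
          simp only [Prod.mk.injEq]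
          refine ⟨trivial, trivial, by omega⟩
        · rw [hfB', hphaseB]
          try rw [← hkdef]
          try rw [← hrdef]
          try rw [← hb1]
          try rw [← hr1]
          try rw [← hcap1def]
          rw [hc1z, pvB_done _ _ _ _ (by norm_num)]
        · rw [hpos1]
          omega
    · -- no full round fits: terminal partial phase
      have hfdz : PySem.Int.floordiv cap k = 0 := by
        rcases lt_or_ge (PySem.Int.floordiv cap k) m with h | h
        · rw [hrdef, min_eq_left (le_of_lt h)] at hr0
          omega
        · rw [hrdef, min_eq_right h] at hr0
          omega
      have hck : cap < k := by
        have := (PySem.Int.floordiv_lt_iff_lt_mul (a := cap) (b := k) (q := 1) (by omega)).mp (by omega)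
        omega
      exact pvTerm a b r cap tot fA fB hcz hck hinv halt hrk (by omega) (by omega)
  · -- capacity is zero
    have hc : cap = 0 := by omega
    subst hc
    refine ⟨a, b, r, ?_, ?_, hinv, ?_, hrk⟩
    · rw [pvA_done _ _ _ _ _ _ (by norm_num)]
      norm_num
    · rw [pvB_done _ _ _ _ (by norm_num)]
    · omega

theorem pvOuter (fuel : Nat) : ∀ (r : PySem.Dict String Int) (cs tot : Int)
    (chunks : List (List (String × Int))), (1 ≤ cs ∨ tot ≤ 0) → tot ≤ pvPos r →
    r.keys = pvPestel →
    pvA_outer fuel r cs tot chunks = pvB_outer fuel r cs tot chunks := by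
  induction fuel with
  | zero => intro r cs tot chunks _ _ _; rfl
  | succ fuel ihf =>
    intro r cs tot chunks hcs hpos hrk
    by_cases ht : 0 < tot
    · have hcs1 : 1 ≤ cs := by
        rcases hcs with h | h
        · exact h
        · omega
      have hndA : pvPestel.Nodup := by decide
      set chunk0 : PySem.Dict String Int := pvPestel.foldl (fun d dom => d.insert dom 0) PySem.Dict.empty with hch0
      set capacity := min cs tot with hcap
      have hcap1 : 1 ≤ capacity := le_min hcs1 (by omega)
      have hcaptot : capacity ≤ tot := min_le_right _ _
      have hg0 : ∀ d, chunk0.getD d 0 = 0 := by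
        intro d
        rw [hch0]
        show (PySem.Dict.mk [("political", 0), ("economic", 0), ("social", 0),
          ("technological", 0), ("environmental", 0), ("legal", 0)]).getD d 0 = 0
        rw [PySem.Dict.getD_eq_get?_getD]
        simp only [PySem.Dict.get?_mk_cons]
        split_ifs <;> rfl
      have hinv0 : pvInv chunk0 PySem.Dict.empty := by
        refine ⟨by rfl, ?_, ?_, ?_⟩
        · intro d
          rw [hg0 d, PySem.Dict.getD_empty]
        · intro d
          rw [hg0 d]
        · have hf : pvPestel.filter (fun d => decide (0 < chunk0.getD d 0)) = [] := by
            apply List.filter_eq_nil_iff.mpr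
            intro d _
            rw [hg0 d]
            simp
          rw [hf]
          rfl
      obtain ⟨a', b', r', hA, hB, hinv', hpos', hkeys'⟩ :=
        pvInner capacity.toNat capacity rfl (capacity.toNat * 6 + 6) 20
          chunk0 PySem.Dict.empty r tot (by omega) (le_trans hcaptot hpos) hinv0
          (Or.inl hg0) hrk (by omega)
          (by
            have h1 := List.length_filter_le (fun d => decide (0 < r.getD d 0)) pvPestel
            have h6 : pvPestel.length = 6 := rfl
            rw [h6] at h1
            unfold pvAct
            omega)
      have hchunks : a'.items.filter (fun p => decide (0 < p.2)) = b'.items := by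
        obtain ⟨hka', hgd', hnn', hbi'⟩ := hinv'
        have hia' : a'.items = pvPestel.map (fun d => (d, a'.getD d 0)) := by
          rw [PySem.Dict.items_eq_map_keys a' (hka' ▸ hndA) 0, hka']
        rw [hia', hbi', List.filter_map]
        congr 1
      rw [pvA_outer, pvB_outer, if_pos ht, if_pos ht]
      simp only [← hch0, ← hcap, hA, hB, hchunks]
      exact ihf r' cs (tot - capacity) (chunks ++ [b'.items]) (Or.inl hcs1)
        (by rw [hpos']; omega) hkeys'
    · rw [pvA_outer, pvB_outer, if_neg ht, if_neg ht]

-- ===== VERDICT (by name: the statement is the Claim_ definition above) =====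
theorem plan_chunks_py_spec : Claim_equal_plan_chunks_py := by
  unfold Claim_equal_plan_chunks_py
  intro dts cs hdom hpre
  unfold Spec_plan_chunks_py
  unfold plan_chunks_py plan_chunks_py_alt
  have hndA : pvPestel.Nodup := by decide
  set v : String → Int := fun d => (PySem.Dict.mk dts).getD d 0 with hv
  set remaining : PySem.Dict String Int :=
    pvPestel.foldl (fun d dom => d.insert dom ((PySem.Dict.mk dts).getD dom 0)) PySem.Dict.empty
    with hrem
  have hitems : remaining.items = pvPestel.map (fun d => (d, v d)) := by
    rw [hrem]
    exact PySem.Dict.items_foldl_insert_fresh pvPestel (fun a => a) (fun a => v a)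
      PySem.Dict.empty (fun a _ => PySem.Dict.contains_empty a) (by simpa using hndA)
  have hkeys : remaining.keys = pvPestel := by
    show remaining.items.map Prod.fst = pvPestel
    rw [hitems, List.map_map]
    have hcomp : (Prod.fst ∘ fun d : String => (d, v d)) = id := rfl
    rw [hcomp, List.map_id]
  have hvals : remaining.values.sum = (pvPestel.map v).sum := by
    show (remaining.items.map Prod.snd).sum = _
    rw [hitems, List.map_map]
    rfl
  have hget : ∀ d ∈ pvPestel, remaining.getD d 0 = v d := by
    intro d hd
    exact PySem.Dict.getD_of_mem_items remaining
      (hitems ▸ List.mem_map_of_mem hd) (hkeys ▸ hndA) 0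
  by_cases h0 : remaining.values.sum ≤ 0
  · rw [if_pos h0, if_pos h0]
  · rw [if_neg h0, if_neg h0]
    apply pvOuter
    · rcases hpre with h | h
      · exfalso
        rw [hvals] at h0
        exact h0 h
      · exact Or.inl h
    · unfold pvPos
      rw [hvals]
      apply List.sum_le_sum
      intro d hd
      rw [hget d hd]
      exact le_max_left _ _
    · exact hkeys
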